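-- pv_equiv track=rewrite | github.com/allonthefarm/mediabutler | mediabutler.py | media_file_sort
-- ===== SOURCE A (Python) =====
-- def media_file_sort(file_index):
--     indexed_files = {}
--     for file in file_index:
--         key = file["date"] + "_" + file["extension"]
--         if key in indexed_files:
--             indexed_files[key].append(file)
--         else:
--             indexed_files[key] = [file]
--     return indexed_files
-- ===== SOURCE B (Python) =====
-- def media_file_sort(file_index):
--     keyed = [(f["date"] + "_" + f["extension"], f) for f in file_index]
--     order = list(dict.fromkeys(k for k, _ in keyed))
--     return {k: [f for k2, f in keyed if k2 == k] for k in order}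
-- ===== Notes on version B (the rewrite author's own statement) =====
-- stated objective: alternative
-- what changed: B replaces A's incremental dict bucketing (membership test then append-or-create per file) by a key-then-group decomposition: one pass pairing each file with its key, an ordered dedup of the keys (dict.fromkeys), and one comprehension collecting the files of each distinct key.
import Mathlib
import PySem

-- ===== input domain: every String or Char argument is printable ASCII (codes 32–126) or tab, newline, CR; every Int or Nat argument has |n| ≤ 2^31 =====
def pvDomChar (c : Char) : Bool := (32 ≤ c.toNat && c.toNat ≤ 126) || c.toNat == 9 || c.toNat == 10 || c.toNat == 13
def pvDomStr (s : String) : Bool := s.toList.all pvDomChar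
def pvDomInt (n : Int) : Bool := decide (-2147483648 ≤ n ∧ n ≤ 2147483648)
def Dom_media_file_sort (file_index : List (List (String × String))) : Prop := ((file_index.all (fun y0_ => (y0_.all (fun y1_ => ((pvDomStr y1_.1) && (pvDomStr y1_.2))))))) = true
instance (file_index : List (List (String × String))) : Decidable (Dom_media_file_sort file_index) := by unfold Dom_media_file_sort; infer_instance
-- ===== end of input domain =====

-- B groups by key with a single keying pass, an ordered key dedup (dict.fromkeys) and one
-- comprehension per distinct key, instead of A's incremental dict bucketing; objective: alternative.

-- ===== PORT A =====
def media_file_sort (file_index : List (List (String × String))) : List (String × List (List (String × String))) :=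
  (file_index.foldl
    (fun indexed_files file =>
      let key := (PySem.Dict.mk file).getD "date" "" ++ "_" ++ (PySem.Dict.mk file).getD "extension" ""
      if indexed_files.contains key then
        indexed_files.modify key [] (fun l => l ++ [file])
      else
        indexed_files.insert key [file])
    PySem.Dict.empty).items

-- ===== PORT B =====
def media_file_sort_alt (file_index : List (List (String × String))) : List (String × List (List (String × String))) :=
  let keyed := file_index.map (fun f =>
    ((PySem.Dict.mk f).getD "date" "" ++ "_" ++ (PySem.Dict.mk f).getD "extension" "", f))
  let order := PySem.List.dedup (keyed.map (fun p => p.1))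
  order.map (fun k => (k, (keyed.filter (fun p => p.1 == k)).map (fun p => p.2)))

-- ===== PRECONDITION & SPEC =====
-- Pre_ excludes files missing a "date" or "extension" key (Python A raises KeyError there) and
-- association lists with duplicate keys, which do not represent a Python dict (a dict has unique keys).
def Pre_media_file_sort (file_index : List (List (String × String))) : Prop :=
  ∀ f ∈ file_index, (f.map Prod.fst).Nodup ∧ "date" ∈ f.map Prod.fst ∧ "extension" ∈ f.map Prod.fst
instance (file_index : List (List (String × String))) : Decidable (Pre_media_file_sort file_index) := by unfold Pre_media_file_sort; infer_instance

def pvWitness_media_file_sort : (List (List (String × String))) :=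
  [[("date", "2020-01-01"), ("extension", "jpg")], [("date", "2020-01-01"), ("extension", "png")]]

def Spec_media_file_sort (file_index : List (List (String × String))) (out : List (String × List (List (String × String)))) : Prop := out = media_file_sort_alt file_index
instance (file_index : List (List (String × String))) (out : List (String × List (List (String × String)))) : Decidable (Spec_media_file_sort file_index out) := by unfold Spec_media_file_sort; infer_instance

-- ===== CLAIM (what is proved, stated in full; the proofs are below) =====
def Claim_equal_media_file_sort : Prop := ∀ (file_index : List (List (String × String))), Dom_media_file_sort file_index → Pre_media_file_sort file_index → Spec_media_file_sort file_index (media_file_sort file_index)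

-- ===== LEMMAS AND PROOFS =====

-- A's branched step is one Python-style dict modify.
lemma mfs_step_eq {α : Type} (K : α → String) (d : PySem.Dict String (List α)) (f : α) :
    (if d.contains (K f) then d.modify (K f) [] (fun l => l ++ [f]) else d.insert (K f) [f])
      = d.modify (K f) [] (fun l => l ++ [f]) := by
  by_cases h : d.contains (K f) = true
  · simp [h]
  · simp only [h, if_neg, Bool.false_eq_true, not_false_eq_true]
    simp [PySem.Dict.modify, PySem.Dict.getD_of_not_contains d [] (by simpa using h)]

-- Generic form of the equivalence, over an arbitrary key function.
lemma mfs_main {α : Type} (K : α → String) (fi : List α) :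
    (fi.foldl
      (fun d f => if d.contains (K f) then d.modify (K f) [] (fun l => l ++ [f]) else d.insert (K f) [f])
      PySem.Dict.empty).items
    = (PySem.List.dedup ((fi.map (fun f => (K f, f))).map (fun p => p.1))).map
        (fun k => (k, ((fi.map (fun f => (K f, f))).filter (fun p => p.1 == k)).map (fun p => p.2))) := by
  have h1 : fi.foldl
      (fun d f => if d.contains (K f) then d.modify (K f) [] (fun l => l ++ [f]) else d.insert (K f) [f])
      PySem.Dict.empty
      = (fi.map (fun f => (K f, f))).foldl (fun d p => d.modify p.1 [] (fun l => l ++ [p.2])) PySem.Dict.empty := by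
    rw [List.foldl_map]
    simp only [mfs_step_eq K]
  rw [h1]
  set l := fi.map (fun f => (K f, f)) with hl
  have hnd : ((l.foldl (fun d p => d.modify p.1 [] (fun x => x ++ [p.2])) PySem.Dict.empty)).keys.Nodup :=
    PySem.Dict.nodup_keys_foldl_modify_key l Prod.fst [] (fun _ p => (fun x => x ++ [p.2])) PySem.Dict.empty (by simp)
  rw [PySem.Dict.items_eq_map_keys _ hnd []]
  have hkeys : ((l.foldl (fun d p => d.modify p.1 [] (fun x => x ++ [p.2])) PySem.Dict.empty)).keys
      = PySem.List.dedup (l.map (fun p => p.1)) := by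
    have := PySem.Dict.keys_foldl_modify_key l Prod.fst [] (fun _ p => (fun x => x ++ [p.2])) PySem.Dict.empty
    simpa [PySem.Set.update_nil_left] using this
  rw [hkeys]
  refine List.map_congr_left (fun k _ => ?_)
  rw [PySem.Dict.getD_foldl_modify_append]
  simp

-- ===== VERDICT (by name: the statement is the Claim_ definition above) =====
theorem media_file_sort_spec : Claim_equal_media_file_sort := by
  intro fi _ _
  show media_file_sort fi = media_file_sort_alt fi
  exact mfs_main (fun f => (PySem.Dict.mk f).getD "date" "" ++ "_" ++ (PySem.Dict.mk f).getD "extension" "") fi
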